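-- pv_equiv track=rewrite | github.com/sudhirsinghshekhawat/problem_solving | backtrack/nqueen.py | get_candidate
-- ===== SOURCE A (Python) =====
-- def get_candidate(state, n):
--     if not state:
--         return range(n)
--
--     position = len(state)
--     candidate = set(range(n))
--
--     for row, col in enumerate(state):
--         candidate.discard(col)
--         distance = position - row
--         candidate.discard(col + distance)
--         candidate.discard(col - distance)
--     return candidate
-- ===== SOURCE B (Python) =====
-- def get_candidate(state, n):
--     if not state:
--         return range(n)
--
--     position = len(state)
--     return {c for c in range(n)
--             if all(c != col and abs(c - col) != position - row
--                    for row, col in enumerate(state))}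
-- ===== Notes on version B (the rewrite author's own statement) =====
-- stated objective: simpler
-- what changed: Replaces the subtractive pass (start from set(range(n)), discard three conflicting columns per placed queen) with a direct set comprehension that keeps each column iff it conflicts with no placed queen (c != col and abs(c-col) != position-row).
import Mathlib
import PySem

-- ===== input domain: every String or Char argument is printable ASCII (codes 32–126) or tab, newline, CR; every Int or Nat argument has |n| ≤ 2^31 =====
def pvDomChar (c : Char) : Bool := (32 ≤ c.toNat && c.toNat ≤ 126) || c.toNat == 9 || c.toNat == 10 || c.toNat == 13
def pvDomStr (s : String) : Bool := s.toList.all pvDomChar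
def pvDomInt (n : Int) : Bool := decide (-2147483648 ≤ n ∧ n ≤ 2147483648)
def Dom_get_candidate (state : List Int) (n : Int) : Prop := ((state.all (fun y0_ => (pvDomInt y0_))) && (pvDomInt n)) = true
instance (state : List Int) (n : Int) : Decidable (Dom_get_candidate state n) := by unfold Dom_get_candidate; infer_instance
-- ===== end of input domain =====

-- B replaces A's subtractive discard loop by a direct per-column conflict test (simpler, one comprehension).

-- ===== PORT A =====
def get_candidate (state : List Int) (n : Int) : List Int :=
  if state = [] then PySem.List.pyRange 0 n 1
  else
    let position : Int := PySem.List.len state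
    let candidate : PySem.Set Int := PySem.Set.ofList (PySem.List.pyRange 0 n 1)
    (PySem.List.enumerate state 0).foldl
      (fun cand rc =>
        let cand := PySem.Set.discard cand rc.2
        let distance := position - rc.1
        let cand := PySem.Set.discard cand (rc.2 + distance)
        PySem.Set.discard cand (rc.2 - distance)) candidate

-- ===== PORT B =====
def get_candidate_alt (state : List Int) (n : Int) : List Int :=
  if state = [] then PySem.List.pyRange 0 n 1
  else
    let position : Int := PySem.List.len state
    PySem.Set.ofList ((PySem.List.pyRange 0 n 1).filter
      (fun c => (PySem.List.enumerate state 0).all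
        (fun rc => c != rc.2 && (((c - rc.2).natAbs : Int) != position - rc.1))))

-- ===== PRECONDITION & SPEC =====
def Spec_get_candidate (state : List Int) (n : Int) (out : List Int) : Prop := out = get_candidate_alt state n
instance (state : List Int) (n : Int) (out : List Int) : Decidable (Spec_get_candidate state n out) := by unfold Spec_get_candidate; infer_instance

-- ===== CLAIM (what is proved, stated in full; the proofs are below) =====
def Claim_equal_get_candidate : Prop := ∀ (state : List Int) (n : Int), Dom_get_candidate state n → Spec_get_candidate state n (get_candidate state n)

-- ===== LEMMAS AND PROOFS =====

-- the loop of triple discards over any start list is one filter by the combined conflict test,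
-- provided every enumerated row index is below `position` (so each distance is ≥ 1)
theorem foldl_discard_eq_filter (position : Int) (l : List (Int × Int))
    (h : ∀ rc ∈ l, rc.1 < position) (s : List Int) :
    l.foldl
      (fun cand rc =>
        let cand := PySem.Set.discard cand rc.2
        let distance := position - rc.1
        let cand := PySem.Set.discard cand (rc.2 + distance)
        PySem.Set.discard cand (rc.2 - distance)) s
    = s.filter (fun c => l.all
        (fun rc => c != rc.2 && (((c - rc.2).natAbs : Int) != position - rc.1))) := by
  induction l generalizing s with
  | nil => simp
  | cons rc l ih =>
    have hrc : rc.1 < position := h rc (List.mem_cons_self)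
    rw [List.foldl_cons, ih (fun x hx => h x (List.mem_cons_of_mem _ hx))]
    simp only [PySem.Set.discard, List.filter_filter, List.all_cons]
    apply List.filter_congr
    intro c _
    cases htail : (l.all fun rc => c != rc.2 && (((c - rc.2).natAbs : Int) != position - rc.1)) with
    | false => simp
    | true =>
      simp only [Bool.and_true]
      rw [Bool.eq_iff_iff]
      simp only [Bool.and_eq_true, bne_iff_ne, ne_eq, Bool.not_eq_eq_eq_not, Bool.not_true,
        beq_eq_false_iff_ne, true_and]
      omega

-- ===== VERDICT (by name: the statement is the Claim_ definition above) =====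
theorem get_candidate_spec : Claim_equal_get_candidate := by
  intro state n _
  unfold Spec_get_candidate get_candidate get_candidate_alt
  by_cases hs : state = []
  · simp [hs]
  · simp only [hs, if_false]
    rw [PySem.Set.ofList_eq_self_of_nodup _ (PySem.List.nodup_pyRange_one 0 n)]
    rw [foldl_discard_eq_filter]
    · rw [PySem.Set.ofList_eq_self_of_nodup _ (List.Nodup.filter _ (PySem.List.nodup_pyRange_one 0 n))]
    · intro rc hrc
      rcases (PySem.List.mem_enumerate_iff _ _ _).mp hrc with ⟨k, hk, hp⟩
      subst hp
      simp only [PySem.List.len]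
      omega
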